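-- pv_equiv track=rewrite | github.com/DexWilder/algo-lab | engine/regime_engine.py | get_active_strategies
-- ===== SOURCE A (Python) =====
-- def get_active_strategies(date_regime: dict, profiles: dict) -> list:
--     """Given a date's regime state, return which strategies should be active.
--
--     Parameters
--     ----------
--     date_regime : dict
--         Keys: vol_regime, trend_regime, rv_regime, composite_regime.
--     profiles : dict
--         Strategy regime profiles. Each key is a strategy label, each value
--         has 'preferred_regimes' and 'avoid_regimes' lists.
--
--     Returns
--     -------
--     list of strategy labels that are active in this regime.
--     """
--     active = []
--     current_regimes = set()
--     for key in ["vol_regime", "trend_regime", "rv_regime"]: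
--         if key in date_regime:
--             current_regimes.add(date_regime[key])
--
--     for strat_label, profile in profiles.items():
--         avoid = set(profile.get("avoid_regimes", []))
--         if avoid & current_regimes:
--             continue
--         active.append(strat_label)
--
--     return active
-- ===== SOURCE B (Python) =====
-- def get_active_strategies(date_regime: dict, profiles: dict) -> list:
--     """Given a date's regime state, return which strategies should be active.
--
--     Inverted decomposition: the outer loop runs over the three regime slots and
--     updates a parallel boolean mask over strategies; a final pass emits the
--     unblocked labels. No set of current regimes is maintained.
--     """
--     items = list(profiles.items())
--     blocked = [False] * len(items)
--     for key in ("vol_regime", "trend_regime", "rv_regime"):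
--         if key in date_regime:
--             r = date_regime[key]
--             blocked = [b or (r in p.get("avoid_regimes", []))
--                        for (_, p), b in zip(items, blocked)]
--     return [label for (label, _), b in zip(items, blocked) if not b]
-- ===== Notes on version B (the rewrite author's own statement) =====
-- stated objective: alternative
-- what changed: Inverted the loop nesting: instead of precomputing a current_regimes set and intersecting each strategy's avoid set against it, B loops over the three regime slots as the outer loop and updates a boolean blocked-mask parallel to the strategy list, then a final pass emits the unblocked labels.
import Mathlib
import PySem

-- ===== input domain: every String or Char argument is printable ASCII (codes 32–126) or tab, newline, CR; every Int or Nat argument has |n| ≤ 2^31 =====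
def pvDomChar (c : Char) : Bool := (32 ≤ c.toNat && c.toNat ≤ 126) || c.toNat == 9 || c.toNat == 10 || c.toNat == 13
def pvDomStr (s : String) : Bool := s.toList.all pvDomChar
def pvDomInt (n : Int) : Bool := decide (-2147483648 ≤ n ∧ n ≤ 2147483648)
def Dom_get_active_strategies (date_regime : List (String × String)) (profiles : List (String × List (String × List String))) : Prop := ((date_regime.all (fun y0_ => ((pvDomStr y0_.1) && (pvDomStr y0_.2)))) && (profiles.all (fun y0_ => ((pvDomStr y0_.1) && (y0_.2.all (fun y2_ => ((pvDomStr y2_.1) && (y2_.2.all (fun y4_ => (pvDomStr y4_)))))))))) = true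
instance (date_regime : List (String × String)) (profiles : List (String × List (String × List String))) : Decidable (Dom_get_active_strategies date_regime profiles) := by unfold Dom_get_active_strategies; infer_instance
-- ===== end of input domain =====

-- B inverts the loop nesting: outer loop over the three regime slots updates a boolean
-- blocked-mask parallel to the strategy list; no current_regimes set (objective: alternative).

-- ===== PORT A =====
def get_active_strategies (date_regime : List (String × String)) (profiles : List (String × List (String × List String))) : List String :=
  -- current_regimes built by a loop over the three keys (set add per present key)
  let current : PySem.Set String :=
    ["vol_regime", "trend_regime", "rv_regime"].foldl
      (fun s k =>
        match PySem.Dict.get? (PySem.Dict.mk date_regime) k with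
        | some v => PySem.Set.add s v
        | none => s)
      PySem.Set.empty
  -- second loop over profiles.items(): skip when avoid & current_regimes is nonempty
  profiles.foldl
    (fun active p =>
      let avoid : PySem.Set String :=
        PySem.Set.ofList (PySem.Dict.getD (PySem.Dict.mk p.2) "avoid_regimes" [])
      if PySem.Set.inter avoid current ≠ [] then active
      else active ++ [p.1])
    []

-- ===== PORT B =====
def get_active_strategies_alt (date_regime : List (String × String)) (profiles : List (String × List (String × List String))) : List String :=
  -- blocked = [False] * len(items); outer loop over the three regime slots updates the mask
  let items := profiles
  let blocked : List Bool :=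
    ["vol_regime", "trend_regime", "rv_regime"].foldl
      (fun bl k =>
        match PySem.Dict.get? (PySem.Dict.mk date_regime) k with
        | some r =>
            List.zipWith
              (fun (pp : String × List (String × List String)) (b : Bool) =>
                b || (PySem.Dict.getD (PySem.Dict.mk pp.2) "avoid_regimes" []).contains r)
              items bl
        | none => bl)
      (List.replicate items.length false)
  -- final pass: emit unblocked labels
  (items.zip blocked).filterMap (fun pb => if pb.2 then none else some pb.1.1)

-- ===== PRECONDITION & SPEC =====
def Spec_get_active_strategies (date_regime : List (String × String)) (profiles : List (String × List (String × List String))) (out : List String) : Prop := out = get_active_strategies_alt date_regime profiles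
instance (date_regime : List (String × String)) (profiles : List (String × List (String × List String))) (out : List String) : Decidable (Spec_get_active_strategies date_regime profiles out) := by unfold Spec_get_active_strategies; infer_instance

-- ===== CLAIM (what is proved, stated in full; the proofs are below) =====
def Claim_equal_get_active_strategies : Prop := ∀ (date_regime : List (String × String)) (profiles : List (String × List (String × List String))), Dom_get_active_strategies date_regime profiles → Spec_get_active_strategies date_regime profiles (get_active_strategies date_regime profiles)

-- ===== LEMMAS AND PROOFS =====

-- the per-entry, per-key block condition B's mask accumulates
def pvCnd (date_regime : List (String × String)) (pl : List (String × List String)) (k : String) : Bool :=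
  match PySem.Dict.get? (PySem.Dict.mk date_regime) k with
  | some r => (PySem.Dict.getD (PySem.Dict.mk pl) "avoid_regimes" []).contains r
  | none => false

-- membership in A's current_regimes set = some key among `keys` looks up to x
theorem pv_mem_current (d : List (String × String)) (keys : List String)
    (s : PySem.Set String) (x : String) :
    (x ∈ keys.foldl
      (fun s k =>
        match PySem.Dict.get? (PySem.Dict.mk d) k with
        | some v => PySem.Set.add s v
        | none => s) s)
    ↔ x ∈ s ∨ ∃ k ∈ keys, PySem.Dict.get? (PySem.Dict.mk d) k = some x := by
  induction keys generalizing s with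
  | nil => simp
  | cons k ks ih =>
    simp only [List.foldl_cons]
    cases h : PySem.Dict.get? (PySem.Dict.mk d) k with
    | none =>
      rw [ih]
      constructor
      · rintro (hs | hk); · exact Or.inl hs
        · exact Or.inr ⟨_, by simp [hk.choose_spec.1], hk.choose_spec.2⟩
      · rintro (hs | ⟨k', hk', he⟩); · exact Or.inl hs
        · rcases List.mem_cons.1 hk' with rfl | hm
          · rw [h] at he; cases he
          · exact Or.inr ⟨k', hm, he⟩
    | some v =>
      rw [ih, PySem.Set.mem_add]
      constructor
      · rintro ((hs | rfl) | ⟨k', hk', he⟩)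
        · exact Or.inl hs
        · exact Or.inr ⟨k, List.mem_cons_self, h⟩
        · exact Or.inr ⟨k', List.mem_cons_of_mem _ hk', he⟩
      · rintro (hs | ⟨k', hk', he⟩)
        · exact Or.inl (Or.inl hs)
        · rcases List.mem_cons.1 hk' with rfl | hm
          · rw [h] at he; exact Or.inl (Or.inr (Option.some.inj he).symm)
          · exact Or.inr ⟨k', hm, he⟩

-- per-strategy: A's "avoid & current_regimes nonempty" test = any over keys of pvCnd
theorem pv_cond_eq (d : List (String × String)) (pl : List (String × List String))
    (keys : List String) :
    (PySem.Set.inter (PySem.Set.ofList (PySem.Dict.getD (PySem.Dict.mk pl) "avoid_regimes" []))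
      (keys.foldl
        (fun s k =>
          match PySem.Dict.get? (PySem.Dict.mk d) k with
          | some v => PySem.Set.add s v
          | none => s) PySem.Set.empty) ≠ [])
    ↔ (keys.any (pvCnd d pl) = true) := by
  rw [Ne, List.eq_nil_iff_forall_not_mem, List.any_eq_true]
  push Not
  constructor
  · rintro ⟨x, hx⟩
    rw [PySem.Set.mem_inter, PySem.Set.mem_ofList, pv_mem_current] at hx
    rcases hx with ⟨hav, hcur | ⟨k, hk, he⟩⟩
    · exact absurd hcur (by simp [PySem.Set.empty])
    · exact ⟨k, hk, by simp [pvCnd, he, hav]⟩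
  · rintro ⟨k, hk, hc⟩
    unfold pvCnd at hc
    cases h : PySem.Dict.get? (PySem.Dict.mk d) k with
    | none => rw [h] at hc; cases hc
    | some v =>
      rw [h] at hc
      refine ⟨v, ?_⟩
      rw [PySem.Set.mem_inter, PySem.Set.mem_ofList, pv_mem_current]
      exact ⟨by simpa using hc, Or.inr ⟨k, hk, h⟩⟩

-- append-accumulating "skip if P" fold = filterMap
theorem pv_fold_gen {α β : Type} (P : α → Prop) [DecidablePred P] (f : α → β)
    (l : List α) (acc : List β) :
    l.foldl (fun active p => if P p then active else active ++ [f p]) acc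
    = acc ++ l.filterMap (fun p => if P p then none else some (f p)) := by
  induction l generalizing acc with
  | nil => simp
  | cons p ps ih =>
    rw [List.foldl_cons, List.filterMap_cons, ih]
    by_cases h : P p
    · simp [h]
    · simp [h]

-- pointwise zipWith against a map of the same list is again a map
theorem pv_zipWith_map {α : Type} (l : List α) (g : α → Bool) (c : α → Bool) :
    List.zipWith (fun a b => b || c a) l (l.map g) = l.map (fun a => g a || c a) := by
  induction l with
  | nil => rfl
  | cons q qs ih => simp [ih]

-- B's mask fold, started at ps.map g, stays a map: each step is pointwise
theorem pv_mask_eq (d : List (String × String))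
    (ps : List (String × List (String × List String)))
    (keys : List String) (g : (String × List (String × List String)) → Bool) :
    keys.foldl
      (fun bl k =>
        match PySem.Dict.get? (PySem.Dict.mk d) k with
        | some r =>
            List.zipWith
              (fun (pp : String × List (String × List String)) (b : Bool) =>
                b || (PySem.Dict.getD (PySem.Dict.mk pp.2) "avoid_regimes" []).contains r)
              ps bl
        | none => bl)
      (ps.map g)
    = ps.map (fun p => g p || keys.any (pvCnd d p.2)) := by
  induction keys generalizing g with
  | nil => simp
  | cons k ks ih =>
    simp only [List.foldl_cons]
    cases h : PySem.Dict.get? (PySem.Dict.mk d) k with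
    | none =>
      rw [ih]
      refine List.map_congr_left (fun p _ => ?_)
      simp [pvCnd, h]
    | some r =>
      dsimp only
      rw [pv_zipWith_map ps g
            (fun pp => (PySem.Dict.getD (PySem.Dict.mk pp.2) "avoid_regimes" []).contains r), ih]
      refine List.map_congr_left (fun p _ => ?_)
      simp [pvCnd, h, Bool.or_assoc]

-- zip with a map, then filterMap on the flag = filterMap over the list directly
theorem pv_zip_filterMap {α : Type}
    (l : List (α × List (String × List String)))
    (h : (α × List (String × List String)) → Bool) :
    (l.zip (l.map h)).filterMap (fun pb => if pb.2 then none else some pb.1.1)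
    = l.filterMap (fun p => if h p then none else some p.1) := by
  induction l with
  | nil => rfl
  | cons q qs ih => by_cases hq : h q <;> simp [hq, ih]

-- ===== VERDICT (by name: the statement is the Claim_ definition above) =====
theorem get_active_strategies_spec : Claim_equal_get_active_strategies := by
  intro dr ps _
  show get_active_strategies dr ps = get_active_strategies_alt dr ps
  unfold get_active_strategies get_active_strategies_alt
  simp only []
  rw [pv_fold_gen
      (P := fun p : String × List (String × List String) =>
        PySem.Set.inter (PySem.Set.ofList (PySem.Dict.getD (PySem.Dict.mk p.2) "avoid_regimes" []))
          (["vol_regime", "trend_regime", "rv_regime"].foldl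
            (fun s k =>
              match PySem.Dict.get? (PySem.Dict.mk dr) k with
              | some v => PySem.Set.add s v
              | none => s) PySem.Set.empty) ≠ [])
      (f := Prod.fst), List.nil_append]
  have hrep : List.replicate ps.length false = ps.map (fun _ => false) := by
    simp [List.map_const']
  rw [hrep, pv_mask_eq, pv_zip_filterMap]
  refine (List.filterMap_congr ?_).symm
  intro p _
  by_cases h : ["vol_regime", "trend_regime", "rv_regime"].any (pvCnd dr p.2) = true
  · rw [if_pos (by simpa using h), if_pos ((pv_cond_eq dr p.2 _).2 h)]
  · rw [if_neg (by simpa using h), if_neg (fun hc => h ((pv_cond_eq dr p.2 _).1 hc))]
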